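-- pv_equiv track=rewrite | github.com/tyyb4456/mediTwin-AI | agents/digital_twin/feature_engineering.py | _calculate_charlson_index
-- ===== SOURCE A (Python) =====
-- from typing import Optional, Tuple, Dict, List
--
-- def _calculate_charlson_index(conditions: List[dict], age: int) -> int:
--     """
--     Charlson Comorbidity Index - predicts 10-year mortality.
--
--     Scoring:
--     - Age: 1 point per decade over 40
--     - MI, CHF, PVD, Dementia: 1 point each
--     - COPD, CTD, PUD, Liver disease (mild): 1 point each
--     - Diabetes: 1 point (2 if with end-organ damage)
--     - Hemiplegia, CKD (moderate-severe): 2 points each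
--     - Tumor (non-metastatic): 2 points
--     - Leukemia, Lymphoma: 2 points each
--     - Liver disease (moderate-severe): 3 points
--     - Metastatic tumor, AIDS: 6 points each
--     """
--     score = 0
--
--     # Age component
--     if age >= 50:
--         score += (age - 40) // 10
--
--     # Comorbidity components
--     condition_codes = [c.get("code", "") for c in conditions]
--
--     # 1-point conditions
--     if any(c.startswith("I21") or c.startswith("I22") for c in condition_codes):  # MI
--         score += 1
--     if any(c.startswith("I50") for c in condition_codes):  # CHF
--         score += 1
--     if any(c.startswith("I73") or c.startswith("I70") for c in condition_codes):  # PVD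
--         score += 1
--     if any(c.startswith("I63") or c.startswith("G45") for c in condition_codes):  # CVA/TIA
--         score += 1
--     if any(c.startswith("F01") or c.startswith("F03") or c.startswith("G30") for c in condition_codes):  # Dementia
--         score += 1
--     if any(c.startswith("J4") for c in condition_codes):  # COPD
--         score += 1
--
--     # Diabetes
--     diabetes_codes = [c for c in condition_codes if c.startswith("E1")]
--     if diabetes_codes:
--         # Check for end-organ damage (E10.2-E10.9, E11.2-E11.9)
--         if any(c[3] in "23456789" for c in diabetes_codes if len(c) > 3):
--             score += 2
--         else:
--             score += 1
--
--     # 2-point conditions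
--     if any(c.startswith("G81") for c in condition_codes):  # Hemiplegia
--         score += 2
--     if any(c.startswith("N18") and c >= "N18.3" for c in condition_codes):  # CKD stage 3+
--         score += 2
--     if any(c.startswith("C") and not c.startswith("C77") and not c.startswith("C78") and not c.startswith("C79") for c in condition_codes):  # Non-metastatic tumor
--         score += 2
--
--     # 6-point conditions
--     if any(c.startswith("C77") or c.startswith("C78") or c.startswith("C79") for c in condition_codes):  # Metastatic
--         score += 6
--     if any(c.startswith("B20") for c in condition_codes):  # AIDS
--         score += 6
--
--     return score
-- ===== SOURCE B (Python) =====
-- def _calculate_charlson_index(conditions, age):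
--     # Single pass over the conditions, maintaining one boolean flag per
--     # comorbidity category; weights are added once at the end.
--     mi = chf = pvd = cva = dem = copd = dia = dia_eo = False
--     hemi = ckd = tum = meta = aids = False
--     for cond in conditions:
--         c = cond.get("code", "")
--         if c.startswith(("I21", "I22")):
--             mi = True
--         if c.startswith("I50"):
--             chf = True
--         if c.startswith(("I73", "I70")):
--             pvd = True
--         if c.startswith(("I63", "G45")):
--             cva = True
--         if c.startswith(("F01", "F03", "G30")):
--             dem = True
--         if c.startswith("J4"):
--             copd = True
--         if c.startswith("E1"):
--             dia = True
--             if len(c) > 3 and c[3] in "23456789":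
--                 dia_eo = True
--         if c.startswith("G81"):
--             hemi = True
--         if c.startswith("N18") and c >= "N18.3":
--             ckd = True
--         if c.startswith(("C77", "C78", "C79")):
--             meta = True
--         elif c.startswith("C"):
--             tum = True
--         if c.startswith("B20"):
--             aids = True
--     score = (age - 40) // 10 if age >= 50 else 0
--     score += mi + chf + pvd + cva + dem + copd
--     score += 2 if dia_eo else (1 if dia else 0)
--     score += 2 * (hemi + ckd + tum) + 6 * (meta + aids)
--     return score
-- ===== Notes on version B (the rewrite author's own statement) =====
-- stated objective: alternative
-- what changed: Replaced thirteen separate any()/filter scans over the code list by one single pass over the conditions that maintains a boolean flag per comorbidity category and adds the weights once at the end.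
import Mathlib
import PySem

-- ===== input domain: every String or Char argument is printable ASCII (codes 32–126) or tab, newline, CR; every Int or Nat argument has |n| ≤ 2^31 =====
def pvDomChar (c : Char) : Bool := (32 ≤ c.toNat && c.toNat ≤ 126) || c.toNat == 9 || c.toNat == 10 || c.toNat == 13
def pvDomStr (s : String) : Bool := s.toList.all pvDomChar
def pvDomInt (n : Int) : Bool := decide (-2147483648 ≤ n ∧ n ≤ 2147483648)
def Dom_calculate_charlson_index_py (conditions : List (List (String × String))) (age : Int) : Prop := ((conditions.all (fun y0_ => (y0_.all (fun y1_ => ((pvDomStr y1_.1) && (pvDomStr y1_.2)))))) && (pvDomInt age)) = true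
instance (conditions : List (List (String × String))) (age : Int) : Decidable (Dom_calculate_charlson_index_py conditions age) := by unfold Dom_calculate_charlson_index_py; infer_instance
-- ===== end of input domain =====

-- B replaces A's thirteen separate any()/filter scans over the code list by one
-- single pass maintaining a boolean flag per comorbidity category (alternative decomposition).


-- ===== PORT A =====
-- c.get("code", "") on the association list (dict): first match, default ""
def pvCode (c : List (String × String)) : String :=
  (((c.find? (fun kv => kv.1 == "code")).map Prod.snd).getD "")

def calculate_charlson_index_py (conditions : List (List (String × String))) (age : Int) : Int :=
  let score : Int := 0
  let score := if age ≥ 50 then score + PySem.Int.floordiv (age - 40) 10 else score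
  let condition_codes := conditions.map pvCode
  let score := if condition_codes.any (fun c => PySem.Str.startswith c "I21" || PySem.Str.startswith c "I22") then score + 1 else score
  let score := if condition_codes.any (fun c => PySem.Str.startswith c "I50") then score + 1 else score
  let score := if condition_codes.any (fun c => PySem.Str.startswith c "I73" || PySem.Str.startswith c "I70") then score + 1 else score
  let score := if condition_codes.any (fun c => PySem.Str.startswith c "I63" || PySem.Str.startswith c "G45") then score + 1 else score
  let score := if condition_codes.any (fun c => PySem.Str.startswith c "F01" || PySem.Str.startswith c "F03" || PySem.Str.startswith c "G30") then score + 1 else score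
  let score := if condition_codes.any (fun c => PySem.Str.startswith c "J4") then score + 1 else score
  let diabetes_codes := condition_codes.filter (fun c => PySem.Str.startswith c "E1")
  let score :=
    if diabetes_codes ≠ [] then
      -- any(c[3] in "23456789" for c in diabetes_codes if len(c) > 3)
      if (diabetes_codes.filter (fun c => 3 < PySem.Str.len c)).any
           (fun c => (PySem.Str.pyGet? c 3).any (fun ch => ch ∈ "23456789".toList)) then
        score + 2
      else score + 1
    else score
  let score := if condition_codes.any (fun c => PySem.Str.startswith c "G81") then score + 2 else score
  -- c >= "N18.3" is Python string comparison = Lean's ≤ on String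
  let score := if condition_codes.any (fun c => PySem.Str.startswith c "N18" && decide (("N18.3" : String) ≤ c)) then score + 2 else score
  let score := if condition_codes.any (fun c => PySem.Str.startswith c "C" && !PySem.Str.startswith c "C77" && !PySem.Str.startswith c "C78" && !PySem.Str.startswith c "C79") then score + 2 else score
  let score := if condition_codes.any (fun c => PySem.Str.startswith c "C77" || PySem.Str.startswith c "C78" || PySem.Str.startswith c "C79") then score + 6 else score
  let score := if condition_codes.any (fun c => PySem.Str.startswith c "B20") then score + 6 else score
  score

-- ===== PORT B =====
structure CFlags where
  mi : Bool
  chf : Bool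
  pvd : Bool
  cva : Bool
  dem : Bool
  copd : Bool
  dia : Bool
  diaEo : Bool
  hemi : Bool
  ckd : Bool
  tum : Bool
  mets : Bool
  aids : Bool
deriving Repr, DecidableEq

def cfInit : CFlags :=
  ⟨false, false, false, false, false, false, false, false, false, false, false, false, false⟩

def cfStep (f : CFlags) (cond : List (String × String)) : CFlags :=
  let c := (((cond.find? (fun kv => kv.1 == "code")).map Prod.snd).getD "")
  { mi := f.mi || (PySem.Str.startswith c "I21" || PySem.Str.startswith c "I22")
  , chf := f.chf || PySem.Str.startswith c "I50"
  , pvd := f.pvd || (PySem.Str.startswith c "I73" || PySem.Str.startswith c "I70")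
  , cva := f.cva || (PySem.Str.startswith c "I63" || PySem.Str.startswith c "G45")
  , dem := f.dem || (PySem.Str.startswith c "F01" || PySem.Str.startswith c "F03" || PySem.Str.startswith c "G30")
  , copd := f.copd || PySem.Str.startswith c "J4"
  , dia := f.dia || PySem.Str.startswith c "E1"
  , diaEo := f.diaEo || (PySem.Str.startswith c "E1" &&
      (3 < PySem.Str.len c && (PySem.Str.pyGet? c 3).any (fun ch => ch ∈ "23456789".toList)))
  , hemi := f.hemi || PySem.Str.startswith c "G81"
  , ckd := f.ckd || (PySem.Str.startswith c "N18" && decide (("N18.3" : String) ≤ c))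
  , mets := f.mets || (PySem.Str.startswith c "C77" || PySem.Str.startswith c "C78" || PySem.Str.startswith c "C79")
  , tum := f.tum || (!(PySem.Str.startswith c "C77" || PySem.Str.startswith c "C78" || PySem.Str.startswith c "C79") && PySem.Str.startswith c "C")
  , aids := f.aids || PySem.Str.startswith c "B20" }

def cfBInt (b : Bool) : Int := if b then 1 else 0

def calculate_charlson_index_py_alt (conditions : List (List (String × String))) (age : Int) : Int :=
  let f := conditions.foldl cfStep cfInit
  let score : Int := if age ≥ 50 then PySem.Int.floordiv (age - 40) 10 else 0
  let score := score + (cfBInt f.mi + cfBInt f.chf + cfBInt f.pvd + cfBInt f.cva + cfBInt f.dem + cfBInt f.copd)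
  let score := score + (if f.diaEo then 2 else if f.dia then 1 else 0)
  let score := score + (2 * (cfBInt f.hemi + cfBInt f.ckd + cfBInt f.tum) + 6 * (cfBInt f.mets + cfBInt f.aids))
  score

-- ===== PRECONDITION & SPEC =====
def Spec_calculate_charlson_index_py (conditions : List (List (String × String))) (age : Int) (out : Int) : Prop := out = calculate_charlson_index_py_alt conditions age
instance (conditions : List (List (String × String))) (age : Int) (out : Int) : Decidable (Spec_calculate_charlson_index_py conditions age out) := by unfold Spec_calculate_charlson_index_py; infer_instance

-- ===== CLAIM (what is proved, stated in full; the proofs are below) =====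
def Claim_equal_calculate_charlson_index_py : Prop := ∀ (conditions : List (List (String × String))) (age : Int), Dom_calculate_charlson_index_py conditions age → Spec_calculate_charlson_index_py conditions age (calculate_charlson_index_py conditions age)

-- ===== LEMMAS AND PROOFS =====

theorem cfFold_spec (l : List (List (String × String))) (f : CFlags) :
    l.foldl cfStep f =
      ⟨f.mi || (l.map pvCode).any (fun c => PySem.Str.startswith c "I21" || PySem.Str.startswith c "I22"),
       f.chf || (l.map pvCode).any (fun c => PySem.Str.startswith c "I50"),
       f.pvd || (l.map pvCode).any (fun c => PySem.Str.startswith c "I73" || PySem.Str.startswith c "I70"),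
       f.cva || (l.map pvCode).any (fun c => PySem.Str.startswith c "I63" || PySem.Str.startswith c "G45"),
       f.dem || (l.map pvCode).any (fun c => PySem.Str.startswith c "F01" || PySem.Str.startswith c "F03" || PySem.Str.startswith c "G30"),
       f.copd || (l.map pvCode).any (fun c => PySem.Str.startswith c "J4"),
       f.dia || (l.map pvCode).any (fun c => PySem.Str.startswith c "E1"),
       f.diaEo || (l.map pvCode).any (fun c => PySem.Str.startswith c "E1" &&
         (3 < PySem.Str.len c && (PySem.Str.pyGet? c 3).any (fun ch => ch ∈ "23456789".toList))),
       f.hemi || (l.map pvCode).any (fun c => PySem.Str.startswith c "G81"),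
       f.ckd || (l.map pvCode).any (fun c => PySem.Str.startswith c "N18" && decide (("N18.3" : String) ≤ c)),
       f.tum || (l.map pvCode).any (fun c => !(PySem.Str.startswith c "C77" || PySem.Str.startswith c "C78" || PySem.Str.startswith c "C79") && PySem.Str.startswith c "C"),
       f.mets || (l.map pvCode).any (fun c => PySem.Str.startswith c "C77" || PySem.Str.startswith c "C78" || PySem.Str.startswith c "C79"),
       f.aids || (l.map pvCode).any (fun c => PySem.Str.startswith c "B20")⟩ := by
  induction l generalizing f with
  | nil => simp
  | cons x xs ih =>
      simp only [List.foldl_cons, ih, List.map_cons, List.any_cons]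
      simp [cfStep, pvCode, Bool.or_assoc]

theorem pv_mul_ite (p : Prop) [Decidable p] (k : Int) :
    k * (if p then (1 : Int) else 0) = if p then k else 0 := by
  split_ifs <;> omega

theorem pv_ite_add (p : Prop) [Decidable p] (s k : Int) :
    (if p then s + k else s) = s + (if p then k else 0) := by
  split_ifs <;> omega

theorem calculate_charlson_index_py_spec : Claim_equal_calculate_charlson_index_py := by
  intro conditions age _
  unfold Spec_calculate_charlson_index_py calculate_charlson_index_py calculate_charlson_index_py_alt
  rw [cfFold_spec]
  simp only [cfInit, Bool.false_or, cfBInt]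
  -- name the code list and the two diabetes booleans
  set codes := conditions.map pvCode with hcodes
  set bdia := codes.any (fun c => PySem.Str.startswith c "E1") with hbdia
  set beo := codes.any (fun c => PySem.Str.startswith c "E1" &&
      (3 < PySem.Str.len c && (PySem.Str.pyGet? c 3).any (fun ch => ch ∈ "23456789".toList))) with hbeo
  -- A's filter-of-filter any is B's single-pass end-organ flag
  have heo : ((codes.filter (fun c => PySem.Str.startswith c "E1")).filter
        (fun c => 3 < PySem.Str.len c)).any
        (fun c => (PySem.Str.pyGet? c 3).any (fun ch => ch ∈ "23456789".toList)) = beo := by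
    rw [hbeo]
    simp [List.any_filter, Bool.and_left_comm, Bool.and_assoc]
  -- A's non-metastatic-tumor predicate is B's (pointwise equal booleans)
  have htum : codes.any (fun c => PySem.Str.startswith c "C" && !PySem.Str.startswith c "C77" && !PySem.Str.startswith c "C78" && !PySem.Str.startswith c "C79")
      = codes.any (fun c => !(PySem.Str.startswith c "C77" || PySem.Str.startswith c "C78" || PySem.Str.startswith c "C79") && PySem.Str.startswith c "C") := by
    have hfun : (fun c => PySem.Str.startswith c "C" && !PySem.Str.startswith c "C77" && !PySem.Str.startswith c "C78" && !PySem.Str.startswith c "C79")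
        = (fun c => !(PySem.Str.startswith c "C77" || PySem.Str.startswith c "C78" || PySem.Str.startswith c "C79") && PySem.Str.startswith c "C") := by
      funext c
      cases PySem.Str.startswith c "C" <;> cases PySem.Str.startswith c "C77" <;>
        cases PySem.Str.startswith c "C78" <;> cases PySem.Str.startswith c "C79" <;> rfl
    rw [hfun]
  -- A's nonempty-filter test is B's diabetes flag
  have hdia : (codes.filter (fun c => PySem.Str.startswith c "E1") ≠ []) ↔ bdia = true := by
    rw [hbdia]
    simp [List.any_eq_true, ← List.filter_eq_nil_iff.not.symm]
  -- end-organ damage implies some diabetes code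
  have himp : beo = true → bdia = true := by
    intro h
    rcases List.any_eq_true.mp h with ⟨c, hc, hp⟩
    exact List.any_eq_true.mpr ⟨c, hc, by
      simp only [Bool.and_eq_true] at hp
      exact hp.1⟩
  -- the whole diabetes block, as one additive term
  have hd : ∀ s : Int, (if codes.filter (fun c => PySem.Str.startswith c "E1") ≠ [] then
        (if beo = true then s + 2 else s + 1) else s)
      = s + (if beo = true then 2 else if bdia = true then 1 else 0) := by
    intro s
    cases heoB : beo with
    | true =>
        rw [if_pos (hdia.mpr (himp heoB))]
        simp
    | false =>
        cases hdiaB : bdia with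
        | true =>
            rw [if_pos (hdia.mpr hdiaB)]
            simp
        | false =>
            have hemp : ¬ (codes.filter (fun c => PySem.Str.startswith c "E1") ≠ []) := by
              intro h; exact absurd (hdia.mp h) (by simp [hdiaB])
            rw [if_neg hemp]
            simp

  rw [heo, htum, hd]
  simp only [mul_add, pv_ite_add, pv_mul_ite]
  ring

-- ===== VERDICT (by name: the statement is the Claim_ definition above) =====
-- (verdict theorem is calculate_charlson_index_py_spec above)
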